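-- pv_equiv track=rewrite | github.com/karlicoss/orgparse | orgparse/tests/test_hugedata.py | generate_org_lines
-- ===== SOURCE A (Python) =====
-- def generate_org_lines(num_top_nodes, depth=3, nodes_per_level=1, _level=1):
--     if depth == 0:
--         return
--     for i in range(num_top_nodes):
--         yield ("*" * _level) + ' {0}-th heading of level {1}'.format(i, _level)
--         for child in generate_org_lines(
--                 nodes_per_level, depth - 1, nodes_per_level, _level + 1):
--             yield child
-- ===== SOURCE B (Python) =====
-- def generate_org_lines(num_top_nodes, depth=3, nodes_per_level=1, _level=1):
--     if depth == 0 or num_top_nodes <= 0: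
--         return
--     # Build the (identical for all siblings) child block once, bottom-up,
--     # instead of recursing per sibling; empty when there are no child nodes.
--     block = []
--     if nodes_per_level > 0:
--         for d in range(1, depth):
--             level = _level + depth - d
--             block = [line for i in range(nodes_per_level)
--                      for line in ['{0} {1}-th heading of level {2}'.format('*' * level, i, level)] + block]
--     for i in range(num_top_nodes):
--         yield ("*" * _level) + ' {0}-th heading of level {1}'.format(i, _level)
--         for line in block:
--             yield line
-- ===== Notes on version B (the rewrite author's own statement) =====
-- stated objective: alternative
-- what changed: Replaces the per-sibling recursion with an iterative bottom-up construction that builds the (identical for all siblings) child block once per level and splices it after each heading.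
import Mathlib
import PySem

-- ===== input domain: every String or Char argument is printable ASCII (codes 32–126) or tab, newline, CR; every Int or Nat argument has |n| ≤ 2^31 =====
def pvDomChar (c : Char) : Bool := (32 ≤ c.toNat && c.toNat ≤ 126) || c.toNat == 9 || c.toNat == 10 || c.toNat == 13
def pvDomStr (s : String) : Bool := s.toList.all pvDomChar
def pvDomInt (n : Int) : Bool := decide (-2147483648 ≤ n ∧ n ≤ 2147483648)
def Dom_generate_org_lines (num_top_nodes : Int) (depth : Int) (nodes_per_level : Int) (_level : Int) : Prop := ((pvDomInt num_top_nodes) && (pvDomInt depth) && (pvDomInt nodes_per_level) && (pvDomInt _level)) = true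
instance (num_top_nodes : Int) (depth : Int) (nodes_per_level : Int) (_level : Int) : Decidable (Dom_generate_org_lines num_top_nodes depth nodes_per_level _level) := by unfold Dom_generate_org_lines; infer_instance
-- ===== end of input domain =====

-- B builds each level's (identical for all siblings) child block once, bottom-up,
-- instead of A's per-sibling recursion; return values proved equal on Pre_.

-- ===== PORT A =====
-- ("*" * _level) + ' {0}-th heading of level {1}'.format(i, _level)
def pvLineA (i lvl : Int) : String :=
  String.ofList (PySem.List.pyRepeat ['*'] lvl) ++ " " ++ PySem.Int.toStr i
    ++ "-th heading of level " ++ PySem.Int.toStr lvl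

-- A's recursion, with a fuel counter only to make it total in Lean
-- (depth.toNat + 2 steps suffice on every input Pre_ admits).
def pvGoA : Nat → Int → Int → Int → Int → List String
  | 0, _, _, _, _ => []
  | fuel + 1, num_top_nodes, depth, nodes_per_level, _level =>
    if depth == 0 then []
    else
      (PySem.List.pyRange 0 num_top_nodes 1).foldl
        (fun acc i =>
          acc ++ pvLineA i _level ::
            pvGoA fuel nodes_per_level (depth - 1) nodes_per_level (_level + 1)) []

def generate_org_lines (num_top_nodes : Int) (depth : Int) (nodes_per_level : Int) (_level : Int) : List String :=
  pvGoA (depth.toNat + 2) num_top_nodes depth nodes_per_level _level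

-- ===== PORT B =====
def pvLineB (i lvl : Int) : String :=
  String.ofList (PySem.List.pyRepeat ['*'] lvl) ++ " " ++ PySem.Int.toStr i
    ++ "-th heading of level " ++ PySem.Int.toStr lvl

def generate_org_lines_alt (num_top_nodes : Int) (depth : Int) (nodes_per_level : Int) (_level : Int) : List String :=
  if depth == 0 || num_top_nodes ≤ 0 then []
  else
    let block :=
      if 0 < nodes_per_level then
        (PySem.List.pyRange 1 depth 1).foldl
          (fun blk d =>
            (PySem.List.pyRange 0 nodes_per_level 1).foldl
              (fun acc i => acc ++ pvLineB i (_level + depth - d) :: blk) []) []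
      else []
    (PySem.List.pyRange 0 num_top_nodes 1).foldl
      (fun acc i => acc ++ pvLineB i _level :: block) []

-- ===== PRECONDITION & SPEC =====
-- Pre_ excludes only the inputs on which A raises RecursionError: a negative
-- depth together with positive node counts makes A recurse forever.
def Pre_generate_org_lines (num_top_nodes : Int) (depth : Int) (nodes_per_level : Int) (_level : Int) : Prop :=
  0 ≤ depth ∨ num_top_nodes ≤ 0 ∨ nodes_per_level ≤ 0

instance (num_top_nodes : Int) (depth : Int) (nodes_per_level : Int) (_level : Int) : Decidable (Pre_generate_org_lines num_top_nodes depth nodes_per_level _level) := by unfold Pre_generate_org_lines; infer_instance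

def pvWitness_generate_org_lines : Int × Int × Int × Int := (2, 2, 2, 1)

def Spec_generate_org_lines (num_top_nodes : Int) (depth : Int) (nodes_per_level : Int) (_level : Int) (out : List String) : Prop := out = generate_org_lines_alt num_top_nodes depth nodes_per_level _level
instance (num_top_nodes : Int) (depth : Int) (nodes_per_level : Int) (_level : Int) (out : List String) : Decidable (Spec_generate_org_lines num_top_nodes depth nodes_per_level _level out) := by unfold Spec_generate_org_lines; infer_instance

-- ===== CLAIM (what is proved, stated in full; the proofs are below) =====
def Claim_equal_generate_org_lines : Prop := ∀ (num_top_nodes : Int) (depth : Int) (nodes_per_level : Int) (_level : Int), Dom_generate_org_lines num_top_nodes depth nodes_per_level _level → Pre_generate_org_lines num_top_nodes depth nodes_per_level _level → Spec_generate_org_lines num_top_nodes depth nodes_per_level _level (generate_org_lines num_top_nodes depth nodes_per_level _level)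

-- ===== LEMMAS AND PROOFS =====

theorem pvLine_eq : pvLineB = pvLineA := rfl

-- B's bottom-up block fold equals A's recursive child computation,
-- by induction on the (natural-number) depth.
theorem pvBlock_eq (m : Nat) : ∀ (npl lvl : Int) (fuel : Nat), m ≤ fuel →
    (PySem.List.pyRange 1 ((m : Int) + 1) 1).foldl
        (fun blk d =>
          (PySem.List.pyRange 0 npl 1).foldl
            (fun acc i => acc ++ pvLineB i (lvl + ((m : Int) + 1) - d) :: blk) []) []
      = pvGoA fuel npl (m : Int) npl (lvl + 1) := by
  induction m with
  | zero =>
    intro npl lvl fuel _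
    have h0 : PySem.List.pyRange 1 (((0:Nat) : Int) + 1) 1 = [] :=
      PySem.List.pyRange_one_eq_nil (by norm_num)
    rw [h0, List.foldl_nil]
    cases fuel with
    | zero => rfl
    | succ f => rw [pvGoA, if_pos (by simp)]
  | succ n ih =>
    intro npl lvl fuel hf
    obtain ⟨f, rfl⟩ : ∃ f, fuel = f + 1 := ⟨fuel - 1, by omega⟩
    have hsplit : PySem.List.pyRange 1 ((↑(n + 1) : Int) + 1) 1
        = PySem.List.pyRange 1 ((n : Int) + 1) 1 ++ [(n : Int) + 1] := by
      have := PySem.List.pyRange_one_succ_right (a := 1) (b := (n : Int) + 1) (by omega)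
      simpa [Nat.cast_add, Nat.cast_one] using this
    rw [hsplit, List.foldl_append]
    have hcongr :
        (PySem.List.pyRange 1 ((n : Int) + 1) 1).foldl
            (fun blk d =>
              (PySem.List.pyRange 0 npl 1).foldl
                (fun acc i => acc ++ pvLineB i (lvl + ((↑(n + 1) : Int) + 1) - d) :: blk) []) []
          = (PySem.List.pyRange 1 ((n : Int) + 1) 1).foldl
            (fun blk d =>
              (PySem.List.pyRange 0 npl 1).foldl
                (fun acc i => acc ++ pvLineB i ((lvl + 1) + ((n : Int) + 1) - d) :: blk) []) [] := by
      apply congrFun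
      apply congrFun
      apply congrArg
      funext blk d
      have h5 : lvl + ((↑(n + 1) : Int) + 1) - d = (lvl + 1) + ((n : Int) + 1) - d := by
        push_cast; ring
      rw [h5]
    simp only [List.foldl_cons, List.foldl_nil]
    rw [hcongr, ih npl (lvl + 1) f (by omega)]
    show _ = pvGoA (f + 1) npl (↑(n + 1) : Int) npl (lvl + 1)
    rw [pvGoA, if_neg (by simp; omega)]
    have harg1 : lvl + ((↑(n + 1) : Int) + 1) - ((n : Int) + 1) = lvl + 1 := by push_cast; ring
    have harg2 : (↑(n + 1) : Int) - 1 = (n : Int) := by push_cast; ring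
    rw [harg1, harg2, pvLine_eq]

-- ===== VERDICT (by name: the statement is the Claim_ definition above) =====
theorem generate_org_lines_spec : Claim_equal_generate_org_lines := by
  unfold Claim_equal_generate_org_lines Spec_generate_org_lines
  intro ntn depth npl lvl _hdom hpre
  unfold generate_org_lines generate_org_lines_alt
  by_cases hz : depth = 0
  · subst hz; simp [pvGoA]
  · by_cases hn : ntn ≤ 0
    · rw [if_pos (by simp; omega)]
      show pvGoA (depth.toNat + 1 + 1) ntn depth npl lvl = _
      rw [pvGoA, if_neg (by simpa using hz)]
      rw [PySem.List.pyRange_one_eq_nil (b := ntn) (by omega), List.foldl_nil]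
    · rw [if_neg (by simp; omega)]
      by_cases hp : 0 < npl
      · -- positive child count: Pre_ forces depth > 0; use pvBlock_eq
        have hpos : 0 < depth := by
          rcases hpre with h | h | h <;> omega
        rw [if_pos (by simpa using hp)]
        obtain ⟨m, hm⟩ : ∃ m : Nat, depth = (m : Int) + 1 :=
          ⟨(depth - 1).toNat, by omega⟩
        subst hm
        have htn : ((m : Int) + 1).toNat + 2 = m + 3 := by omega
        rw [htn]
        show pvGoA (m + 3) ntn ((m : Int) + 1) npl lvl = _
        rw [pvGoA, if_neg (by simp; omega)]
        have harg : (m : Int) + 1 - 1 = (m : Int) := by ring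
        rw [harg, ← pvBlock_eq m npl lvl (m + 2) (by omega), pvLine_eq]
      · -- npl ≤ 0: A's child call yields nothing, B's block is []
        rw [if_neg (by simpa using hp)]
        show pvGoA (depth.toNat + 1 + 1) ntn depth npl lvl = _
        rw [pvGoA, if_neg (by simpa using hz)]
        have hchild : pvGoA (depth.toNat + 1) npl (depth - 1) npl (lvl + 1) = [] := by
          show pvGoA (depth.toNat + 1) npl (depth - 1) npl (lvl + 1) = []
          rw [pvGoA]
          split
          · rfl
          · rw [PySem.List.pyRange_one_eq_nil (b := npl) (by omega), List.foldl_nil]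
        rw [hchild, pvLine_eq]
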